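-- pv_equiv track=rewrite | github.com/cirosantilli/project-euler-solutions | solvers/966.py | build_shape_coeffs
-- ===== SOURCE A (Python) =====
-- import math
-- from typing import Dict, Tuple
--
-- def build_shape_coeffs(limit: int) -> Dict[Tuple[int, int, int], int]:
--     """
--     Group triangles by gcd-reduced (primitive) shape.
--     For each primitive shape (a',b',c'), accumulate sum of scale^2.
--
--     If (a,b,c) = g*(a',b',c'), then I(a,b,c) = g^2 * I(a',b',c').
--     """
--     coeff: Dict[Tuple[int, int, int], int] = {}
--     for a in range(1, limit + 1):
--         for b in range(a, limit + 1):
--             maxc = min(a + b - 1, limit - a - b)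
--             if maxc < b:
--                 continue
--             for c in range(b, maxc + 1):
--                 g = math.gcd(a, math.gcd(b, c))
--                 key = (a // g, b // g, c // g)
--                 coeff[key] = coeff.get(key, 0) + g * g
--     return coeff
-- ===== SOURCE B (Python) =====
-- import math
--
--
-- def build_shape_coeffs(limit: int):
--     """Every primitive shape occurs exactly once within the bounds, so the
--     whole result is one dict comprehension: the value for a primitive shape
--     with perimeter s is the closed-form sum of squared scales up to limit // s."""
--     def coeff(s):
--         m = limit // s
--         return m * (m + 1) * (2 * m + 1) // 6  # sum of squares up to m
--
--     return {
--         (a, b, c): coeff(a + b + c)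
--         for a in range(1, limit + 1)
--         for b in range(a, limit + 1)
--         for c in range(b, min(a + b - 1, limit - a - b) + 1)
--         if math.gcd(a, math.gcd(b, c)) == 1
--     }
-- ===== Notes on version B (the rewrite author's own statement) =====
-- stated objective: alternative
-- what changed: A accumulates the squared scale into a dict keyed by the gcd-reduced shape of every scaled triangle; B never accumulates: it is a single dict comprehension over primitive shapes only, writing each coefficient once via the closed form for the sum of consecutive squares applied to limit floor-divided by the perimeter.
import Mathlib
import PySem

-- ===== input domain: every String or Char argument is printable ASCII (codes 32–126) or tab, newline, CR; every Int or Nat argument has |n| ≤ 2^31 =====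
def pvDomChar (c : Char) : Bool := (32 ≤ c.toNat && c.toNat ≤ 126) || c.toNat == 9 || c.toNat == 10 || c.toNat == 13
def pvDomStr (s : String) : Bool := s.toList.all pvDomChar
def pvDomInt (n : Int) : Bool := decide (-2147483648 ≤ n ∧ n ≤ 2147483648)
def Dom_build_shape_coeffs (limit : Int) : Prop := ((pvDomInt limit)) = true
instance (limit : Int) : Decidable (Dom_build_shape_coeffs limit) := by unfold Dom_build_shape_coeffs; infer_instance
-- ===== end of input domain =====

-- Alternative: A accumulates g*g into a dict keyed by each triangle's gcd-reduced shape; B is a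
-- single comprehension over primitive shapes writing each coefficient once, in closed form.

-- ===== PORT A =====
def build_shape_coeffs (limit : Int) : List (Int × Int × Int × Int) :=
  let coeff : PySem.Dict (Int × Int × Int) Int :=
    (PySem.List.pyRange 1 (limit + 1) 1).foldl (fun coeff a =>
      (PySem.List.pyRange a (limit + 1) 1).foldl (fun coeff b =>
        let maxc := min (a + b - 1) (limit - a - b)
        if maxc < b then coeff
        else
          (PySem.List.pyRange b (maxc + 1) 1).foldl (fun coeff c =>
            let g : Int := (Int.gcd a (Int.gcd b c) : Nat)
            let key := (PySem.Int.floordiv a g, PySem.Int.floordiv b g, PySem.Int.floordiv c g)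
            coeff.insert key (coeff.getD key 0 + g * g)) coeff) coeff)
      PySem.Dict.empty
  coeff.items.map (fun p => (p.1.1, p.1.2.1, p.1.2.2, p.2))

-- ===== PORT B =====
-- Source B's coeff(s): the closed-form value for a primitive shape of perimeter s.
def pvCoeff (limit s : Int) : Int :=
  let m := PySem.Int.floordiv limit s
  PySem.Int.floordiv (m * (m + 1) * (2 * m + 1)) 6

-- Source B is a dict comprehension whose keys are pairwise distinct (proved below: the generated
-- triples are strictly lexicographically increasing), so the dict in insertion order is exactly
-- the generated list of (key, value) pairs.
def build_shape_coeffs_alt (limit : Int) : List (Int × Int × Int × Int) :=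
  (PySem.List.pyRange 1 (limit + 1) 1).flatMap (fun a =>
    (PySem.List.pyRange a (limit + 1) 1).flatMap (fun b =>
      ((PySem.List.pyRange b (min (a + b - 1) (limit - a - b) + 1) 1).filter
          (fun c => Int.gcd a (Int.gcd b c) == 1)).map
        (fun c => (a, b, c, pvCoeff limit (a + b + c)))))

-- ===== PRECONDITION & SPEC =====
def Spec_build_shape_coeffs (limit : Int) (out : List (Int × Int × Int × Int)) : Prop := out = build_shape_coeffs_alt limit
instance (limit : Int) (out : List (Int × Int × Int × Int)) : Decidable (Spec_build_shape_coeffs limit out) := by unfold Spec_build_shape_coeffs; infer_instance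

-- ===== CLAIM (what is proved, stated in full; the proofs are below) =====
def Claim_equal_build_shape_coeffs : Prop := ∀ (limit : Int), Dom_build_shape_coeffs limit → Spec_build_shape_coeffs limit (build_shape_coeffs limit)

-- ===== LEMMAS AND PROOFS =====

-- Proof-side helpers: the triangle enumeration, gcd-key, weights, the lexicographic order.
def triC (limit a b : Int) : List Int := PySem.List.pyRange b (min (a + b - 1) (limit - a - b) + 1) 1
def triB (limit a : Int) : List (Int × Int × Int) :=
  (PySem.List.pyRange a (limit + 1) 1).flatMap (fun b => (triC limit a b).map (fun c => (a, b, c)))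
def tri (limit : Int) : List (Int × Int × Int) :=
  (PySem.List.pyRange 1 (limit + 1) 1).flatMap (triB limit)
def gcd3 (t : Int × Int × Int) : Nat := Int.gcd t.1 (Int.gcd t.2.1 t.2.2)
def keyOf (t : Int × Int × Int) : Int × Int × Int :=
  (PySem.Int.floordiv t.1 (gcd3 t), PySem.Int.floordiv t.2.1 (gcd3 t), PySem.Int.floordiv t.2.2 (gcd3 t))
def wA (t : Int × Int × Int) : Int := (gcd3 t : Int) * (gcd3 t : Int)
def updA (d : PySem.Dict (Int × Int × Int) Int) (t : Int × Int × Int) : PySem.Dict (Int × Int × Int) Int :=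
  d.insert (keyOf t) (d.getD (keyOf t) 0 + wA t)
def lexLt (u v : Int × Int × Int) : Prop :=
  u.1 < v.1 ∨ (u.1 = v.1 ∧ (u.2.1 < v.2.1 ∨ (u.2.1 = v.2.1 ∧ u.2.2 < v.2.2)))

lemma mem_tri (limit : Int) (t : Int × Int × Int) :
    t ∈ tri limit ↔ 1 ≤ t.1 ∧ t.1 ≤ t.2.1 ∧ t.2.1 ≤ t.2.2 ∧ t.2.2 ≤ t.1 + t.2.1 - 1 ∧ t.1 + t.2.1 + t.2.2 ≤ limit := by
  obtain ⟨a, b, c⟩ := t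
  simp only [tri, triB, triC, List.mem_flatMap, List.mem_map, PySem.List.mem_pyRange_one,
    Prod.mk.injEq]
  constructor
  · rintro ⟨a', ⟨ha1, ha2⟩, b', ⟨hb1, hb2⟩, c', ⟨hc1, hc2⟩, rfl, rfl, rfl⟩
    omega
  · rintro ⟨h1, h2, h3, h4, h5⟩
    exact ⟨a, by omega, b, by omega, c, by omega, rfl, rfl, rfl⟩

lemma pairwise_tri (limit : Int) : (tri limit).Pairwise lexLt := by
  unfold tri triB
  rw [List.pairwise_flatMap]
  constructor
  · intro a _
    rw [List.pairwise_flatMap]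
    constructor
    · intro b _
      exact (PySem.List.pairwise_lt_pyRange_one _ _).map _ (fun c c' h => Or.inr ⟨rfl, Or.inr ⟨rfl, h⟩⟩)
    · refine (PySem.List.pairwise_lt_pyRange_one _ _).imp ?_
      intro b b' hbb x hx y hy
      simp only [List.mem_map] at hx hy
      obtain ⟨c, _, rfl⟩ := hx
      obtain ⟨c', _, rfl⟩ := hy
      exact Or.inr ⟨rfl, Or.inl hbb⟩
  · refine (PySem.List.pairwise_lt_pyRange_one _ _).imp ?_
    rintro a a' haa x hx y hy
    simp only [List.mem_flatMap, List.mem_map] at hx hy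
    obtain ⟨b, _, c, _, rfl⟩ := hx
    obtain ⟨b', _, c', _, rfl⟩ := hy
    exact Or.inl haa

lemma A_flat (limit : Int) :
    build_shape_coeffs limit = ((tri limit).foldl updA PySem.Dict.empty).items.map (fun p => (p.1.1, p.1.2.1, p.1.2.2, p.2)) := by
  unfold build_shape_coeffs tri triB
  dsimp only
  rw [List.foldl_flatMap]
  congr 2
  apply PySem.List.foldl_congr_mem
  intro acc a _
  rw [List.foldl_flatMap]
  apply PySem.List.foldl_congr_mem
  intro acc b _
  rw [List.foldl_map]
  show (if min (a + b - 1) (limit - a - b) < b then acc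
      else (PySem.List.pyRange b (min (a + b - 1) (limit - a - b) + 1) 1).foldl _ acc) = _
  by_cases h : min (a + b - 1) (limit - a - b) < b
  · rw [if_pos h, triC, PySem.List.pyRange_one_eq_nil (by omega), List.foldl_nil]
  · rw [if_neg h, triC]
    apply PySem.List.foldl_congr_mem
    intro acc c _
    rfl

-- B's value at a primitive shape, written over the triple (used only in the proofs).
def wB (limit : Int) (t : Int × Int × Int) : Int := pvCoeff limit (t.1 + t.2.1 + t.2.2)

lemma B_flat (limit : Int) :
    build_shape_coeffs_alt limit =
      ((tri limit).filter (fun t => gcd3 t == 1)).map (fun t => (t.1, t.2.1, t.2.2, wB limit t)) := by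
  unfold build_shape_coeffs_alt tri triB triC
  rw [List.filter_flatMap, List.map_flatMap]
  refine List.flatMap_congr ?_
  intro a _
  rw [List.filter_flatMap, List.map_flatMap]
  refine List.flatMap_congr ?_
  intro b _
  rw [List.filter_map, List.map_map]
  rfl

lemma lexLt_ne {u v : Int × Int × Int} (h : lexLt u v) : u ≠ v := by
  rintro rfl; unfold lexLt at h; omega

lemma lexLt_asymm {u v : Int × Int × Int} (h : lexLt u v) (h' : lexLt v u) : False := by
  unfold lexLt at h h'; omega

lemma getD_group (L : List (Int × Int × Int)) (d : PySem.Dict (Int × Int × Int) Int) (k : Int × Int × Int) :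
    (L.foldl updA d).getD k 0 = d.getD k 0 + ((L.filter (fun t => keyOf t == k)).map wA).sum := by
  induction L generalizing d with
  | nil => simp
  | cons x L ih =>
    rw [List.foldl_cons, ih]
    by_cases h : keyOf x = k
    · rw [List.filter_cons_of_pos (by simpa using h)]
      simp only [updA, List.map_cons, List.sum_cons, PySem.Dict.getD_insert, h, if_true]
      simp [add_assoc]
    · rw [List.filter_cons_of_neg (by simpa using h)]
      simp only [updA, PySem.Dict.getD_insert]
      rw [if_neg (fun hh => h hh.symm)]

lemma keys_A (L : List (Int × Int × Int)) :
    (L.foldl updA PySem.Dict.empty).keys = PySem.Set.ofList (L.map keyOf) := by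
  rw [show updA = (fun d t => d.insert (keyOf t) (d.getD (keyOf t) 0 + wA t)) from rfl,
    PySem.Dict.keys_foldl_insert_key]
  simp [PySem.Set.update, PySem.Set.ofList_eq_foldl]

lemma nodup_keys_A (L : List (Int × Int × Int)) : (L.foldl updA PySem.Dict.empty).keys.Nodup := by
  exact PySem.Dict.nodup_keys_foldl_insert_key L keyOf _ _ (by simp)

-- first-occurrence lemma
lemma ofList_map_key (L : List (Int × Int × Int)) (hs : L.Pairwise lexLt)
    (hk : ∀ t ∈ L, keyOf t ∈ L ∧ (keyOf t = t ∨ lexLt (keyOf t) t) ∧ keyOf (keyOf t) = keyOf t) :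
    PySem.Set.ofList (L.map keyOf) = L.filter (fun t => keyOf t == t) := by
  induction L using List.reverseRecOn with
  | nil => simp
  | append_singleton L t ih =>
    rw [List.pairwise_append] at hs
    obtain ⟨hsL, -, hcross⟩ := hs
    have hlt : ∀ s ∈ L, lexLt s t := fun s hs' => hcross s hs' t (by simp)
    have hkL : ∀ s ∈ L, keyOf s ∈ L ∧ (keyOf s = s ∨ lexLt (keyOf s) s) ∧ keyOf (keyOf s) = keyOf s := by
      intro s hsmem
      obtain ⟨h1, h2, h3⟩ := hk s (by simp [hsmem])
      refine ⟨?_, h2, h3⟩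
      rcases List.mem_append.mp h1 with h | h
      · exact h
      · exfalso
        simp only [List.mem_singleton] at h
        rcases h2 with h2 | h2
        · rw [h2] at h; subst h; exact lexLt_ne (hlt s hsmem) rfl
        · rw [h] at h2; exact lexLt_asymm h2 (hlt s hsmem)
    have ihe := ih hsL hkL
    rw [List.map_append, List.map_singleton, PySem.Set.ofList_append_singleton, ihe,
      List.filter_append]
    obtain ⟨hmem, hdisj, hidem⟩ := hk t (by simp)
    rcases hdisj with hfix | hlt'
    · rw [PySem.Set.add_of_not_mem, List.filter_singleton]
      · simp [hfix]
      · intro hmm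
        have : t ∈ L := List.mem_of_mem_filter (by rwa [hfix] at hmm)
        exact lexLt_ne (hlt t this) rfl
    · have hne : keyOf t ≠ t := fun h => lexLt_ne (h ▸ hlt') rfl
      rw [PySem.Set.add_of_mem, List.filter_singleton]
      · have hb : (keyOf t == t) = false := by simpa using hne
        simp [hb]
      · have hmemL : keyOf t ∈ L := by
          rcases List.mem_append.mp hmem with h | h
          · exact h
          · simp only [List.mem_singleton] at h; exact absurd h hne
        exact List.mem_filter.mpr ⟨hmemL, by simp [hidem]⟩

lemma gcd3_pos {t : Int × Int × Int} (h1 : 1 ≤ t.1) : 0 < gcd3 t := by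
  rcases Nat.eq_zero_or_pos (gcd3 t) with h | h
  · unfold gcd3 at h
    rw [Int.gcd_eq_zero_iff] at h
    omega
  · exact h

lemma key_mul {t : Int × Int × Int} (h1 : 1 ≤ t.1) :
    (gcd3 t : Int) * (keyOf t).1 = t.1 ∧ (gcd3 t : Int) * (keyOf t).2.1 = t.2.1 ∧
      (gcd3 t : Int) * (keyOf t).2.2 = t.2.2 := by
  have hg : (0 : Int) < (gcd3 t : Int) := by exact_mod_cast gcd3_pos h1
  have d1 : (gcd3 t : Int) ∣ t.1 := Int.gcd_dvd_left _ _
  have d2 : (gcd3 t : Int) ∣ t.2.1 := dvd_trans (Int.gcd_dvd_right _ _) (Int.gcd_dvd_left _ _)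
  have d3 : (gcd3 t : Int) ∣ t.2.2 := dvd_trans (Int.gcd_dvd_right _ _) (Int.gcd_dvd_right _ _)
  refine ⟨?_, ?_, ?_⟩ <;>
    simp only [keyOf, PySem.Int.floordiv_eq_ediv_of_pos hg] <;>
    [exact Int.mul_ediv_cancel' d1; exact Int.mul_ediv_cancel' d2; exact Int.mul_ediv_cancel' d3]

lemma gcd3_smul (g : Int) (hg : 0 ≤ g) (k : Int × Int × Int) :
    gcd3 (g * k.1, g * k.2.1, g * k.2.2) = g.toNat * gcd3 k := by
  have hcast : ((g.natAbs : Int)) = g := Int.natAbs_of_nonneg hg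
  unfold gcd3
  rw [Int.gcd_mul_left g k.2.1 k.2.2]
  have h2 : ((g.natAbs * Int.gcd k.2.1 k.2.2 : Nat) : Int) = g * (Int.gcd k.2.1 k.2.2 : Int) := by
    push_cast [hcast]; ring
  rw [h2, Int.gcd_mul_left g k.1 (Int.gcd k.2.1 k.2.2 : Int)]
  have h3 : g.natAbs = g.toNat := by omega
  rw [h3]

lemma gcd3_keyOf {t : Int × Int × Int} (h1 : 1 ≤ t.1) : gcd3 (keyOf t) = 1 := by
  obtain ⟨e1, e2, e3⟩ := key_mul h1
  have hgpos := gcd3_pos h1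
  have h := gcd3_smul (gcd3 t : Int) (by positivity) (keyOf t)
  rw [e1, e2, e3] at h
  have ht : gcd3 t = gcd3 ((t.1, t.2.1, t.2.2)) := by congr
  rw [← ht, Int.toNat_natCast] at h
  nlinarith [h]

lemma keyOf_of_gcd_one {k : Int × Int × Int} (hk : gcd3 k = 1) : keyOf k = k := by
  have : ((gcd3 k : Nat) : Int) = 1 := by rw [hk]; rfl
  simp only [keyOf, this]
  simp

lemma keyOf_smul (g : Int) (hg : 1 ≤ g) (k : Int × Int × Int) (hk : gcd3 k = 1) :
    keyOf (g * k.1, g * k.2.1, g * k.2.2) = (k.1, k.2.1, k.2.2) ∧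
      gcd3 (g * k.1, g * k.2.1, g * k.2.2) = g.toNat := by
  have hgc : gcd3 (g * k.1, g * k.2.1, g * k.2.2) = g.toNat := by
    rw [gcd3_smul g (by omega), hk, mul_one]
  have hcast : ((g.toNat : Nat) : Int) = g := by omega
  refine ⟨?_, hgc⟩
  simp only [keyOf, hgc, hcast, PySem.Int.floordiv_eq_ediv_of_pos (by omega : (0:Int) < g)]
  rw [Int.mul_ediv_cancel_left _ (by omega : g ≠ 0), Int.mul_ediv_cancel_left _ (by omega : g ≠ 0),
    Int.mul_ediv_cancel_left _ (by omega : g ≠ 0)]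

lemma keyOf_eq_self_iff {t : Int × Int × Int} (h1 : 1 ≤ t.1) : keyOf t = t ↔ gcd3 t = 1 := by
  constructor
  · intro h
    obtain ⟨e1, -, -⟩ := key_mul h1
    rw [h] at e1
    have := gcd3_pos h1
    nlinarith [e1]
  · intro h; exact keyOf_of_gcd_one h

lemma key_spec (limit : Int) (t : Int × Int × Int) (ht : t ∈ tri limit) :
    keyOf t ∈ tri limit ∧ (keyOf t = t ∨ lexLt (keyOf t) t) ∧ keyOf (keyOf t) = keyOf t := by
  rw [mem_tri] at ht
  obtain ⟨h1, h2, h3, h4, h5⟩ := ht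
  have hg : 0 < gcd3 t := gcd3_pos h1
  have hgi : (1 : Int) ≤ (gcd3 t : Int) := by exact_mod_cast hg
  obtain ⟨e1, e2, e3⟩ := key_mul h1
  have k1 : 1 ≤ (keyOf t).1 := by nlinarith
  have k2 : (keyOf t).1 ≤ (keyOf t).2.1 := by nlinarith
  have k3 : (keyOf t).2.1 ≤ (keyOf t).2.2 := by nlinarith
  have k4 : (keyOf t).2.2 ≤ (keyOf t).1 + (keyOf t).2.1 - 1 := by nlinarith
  have k5 : (keyOf t).1 + (keyOf t).2.1 + (keyOf t).2.2 ≤ limit := by nlinarith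
  refine ⟨(mem_tri _ _).mpr ⟨k1, k2, k3, k4, k5⟩, ?_, ?_⟩
  · by_cases h : gcd3 t = 1
    · exact Or.inl ((keyOf_eq_self_iff h1).mpr h)
    · refine Or.inr (Or.inl ?_)
      have : (2 : Int) ≤ (gcd3 t : Int) := by exact_mod_cast (by omega : 2 ≤ gcd3 t)
      nlinarith
  · exact keyOf_of_gcd_one (gcd3_keyOf h1)

lemma filter_key_eq (limit : Int) (k : Int × Int × Int) (hkmem : k ∈ tri limit) (hk1 : gcd3 k = 1) :
    (tri limit).filter (fun t => keyOf t == k) =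
      (PySem.List.pyRange 1 (PySem.Int.floordiv limit (k.1 + k.2.1 + k.2.2) + 1) 1).map
        (fun g => (g * k.1, g * k.2.1, g * k.2.2)) := by
  have hkb := (mem_tri _ _).mp hkmem
  obtain ⟨j1, j2, j3, j4, j5⟩ := hkb
  have hs : (0 : Int) < k.1 + k.2.1 + k.2.2 := by omega
  have hmem : ∀ x, x ∈ (tri limit).filter (fun t => keyOf t == k) ↔
      x ∈ (PySem.List.pyRange 1 (PySem.Int.floordiv limit (k.1 + k.2.1 + k.2.2) + 1) 1).map
        (fun g => (g * k.1, g * k.2.1, g * k.2.2)) := by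
    intro x
    rw [List.mem_filter, List.mem_map]
    simp only [PySem.List.mem_pyRange_one, beq_iff_eq]
    constructor
    · rintro ⟨hx, hkey⟩
      have hxb := (mem_tri _ _).mp hx
      obtain ⟨h1, h2, h3, h4, h5⟩ := hxb
      have hgi : (1 : Int) ≤ (gcd3 x : Int) := by exact_mod_cast gcd3_pos h1
      obtain ⟨e1, e2, e3⟩ := key_mul h1
      rw [hkey] at e1 e2 e3
      refine ⟨(gcd3 x : Int), ⟨hgi, ?_⟩, ?_⟩
      · have : (gcd3 x : Int) * (k.1 + k.2.1 + k.2.2) ≤ limit := by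
          rw [mul_add, mul_add, e1, e2, e3]; omega
        have := (PySem.Int.le_floordiv_iff_mul_le hs (q := (gcd3 x : Int))).mpr this
        omega
      · exact Prod.ext e1 (Prod.ext e2 e3)
    · rintro ⟨g, ⟨hg1, hg2⟩, rfl⟩
      have hgs : g * (k.1 + k.2.1 + k.2.2) ≤ limit :=
        (PySem.Int.le_floordiv_iff_mul_le hs).mp (by omega)
      constructor
      · rw [mem_tri]
        refine ⟨by nlinarith, by nlinarith, by nlinarith, by nlinarith, by nlinarith⟩
      · have := (keyOf_smul g hg1 k hk1).1
        rw [this]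
  refine List.Perm.eq_of_pairwise (le := lexLt) ?_ ?_ ?_ ?_
  · intro a b _ _ hab hba; exact absurd hba (fun h => lexLt_asymm hab h)
  · exact (pairwise_tri limit).filter _
  · refine List.Pairwise.map _ ?_ (PySem.List.pairwise_lt_pyRange_one _ _)
    intro g g' hgg
    exact Or.inl (by nlinarith)
  · rw [List.perm_ext_iff_of_nodup]
    · exact hmem
    · exact (((pairwise_tri limit).imp (fun h => lexLt_ne h)).filter _)
    · refine (PySem.List.nodup_pyRange_one _ _).map_on ?_
      intro g hg g' hg' heq
      have := congrArg Prod.fst heq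
      simp only at this
      have hk1' : k.1 ≠ 0 := by omega
      exact mul_right_cancel₀ hk1' this

lemma sumsq (m : Int) (hm : 0 ≤ m) :
    6 * ((PySem.List.pyRange 1 (m + 1) 1).map (fun g => g * g)).sum = m * (m + 1) * (2 * m + 1) := by
  induction m, hm using Int.le_induction with
  | base => rw [PySem.List.pyRange_one_eq_nil (by omega)]; simp
  | succ m hm' ih =>
    rw [PySem.List.pyRange_one_succ_right (by omega), List.map_append, List.sum_append]
    simp only [List.map_cons, List.map_nil, List.sum_cons, List.sum_nil]
    linear_combination ih

lemma sum_filter_key (limit : Int) (k : Int × Int × Int) (hkmem : k ∈ tri limit) (hk1 : gcd3 k = 1) :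
    (((tri limit).filter (fun t => keyOf t == k)).map wA).sum = wB limit k := by
  rw [filter_key_eq limit k hkmem hk1, List.map_map]
  obtain ⟨j1, j2, j3, j4, j5⟩ := (mem_tri _ _).mp hkmem
  have hs : (0 : Int) < k.1 + k.2.1 + k.2.2 := by omega
  have hm : (0 : Int) ≤ PySem.Int.floordiv limit (k.1 + k.2.1 + k.2.2) := by
    have h1s : (1 : Int) * (k.1 + k.2.1 + k.2.2) ≤ limit := by omega
    have := (PySem.Int.le_floordiv_iff_mul_le hs).mpr h1s
    omega
  have hmap : ((PySem.List.pyRange 1 (PySem.Int.floordiv limit (k.1 + k.2.1 + k.2.2) + 1) 1).map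
      (wA ∘ fun g => (g * k.1, g * k.2.1, g * k.2.2))) =
      ((PySem.List.pyRange 1 (PySem.Int.floordiv limit (k.1 + k.2.1 + k.2.2) + 1) 1).map
      (fun g => g * g)) := by
    refine List.map_congr_left ?_
    intro g hg
    rw [PySem.List.mem_pyRange_one] at hg
    have hgt := (keyOf_smul g hg.1 k hk1).2
    simp only [Function.comp, wA, hgt]
    have : ((g.toNat : Nat) : Int) = g := by omega
    rw [this]
  rw [hmap]
  unfold wB pvCoeff
  dsimp only
  rw [← sumsq _ hm, PySem.Int.floordiv_eq_ediv_of_pos (by omega : (0:Int) < 6),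
    Int.mul_ediv_cancel_left _ (by omega : (6:Int) ≠ 0)]

-- ===== VERDICT (by name: the statement is the Claim_ definition above) =====
theorem build_shape_coeffs_spec : Claim_equal_build_shape_coeffs := by
  intro limit _
  unfold Spec_build_shape_coeffs
  rw [A_flat, B_flat]
  have hfix : (tri limit).filter (fun t => gcd3 t == 1) = (tri limit).filter (fun t => keyOf t == t) := by
    refine List.filter_congr ?_
    intro t ht
    have h1 := ((mem_tri _ _).mp ht).1
    by_cases h : gcd3 t = 1
    · simp [h, (keyOf_eq_self_iff h1).mpr h]
    · have hne : keyOf t ≠ t := fun he => h ((keyOf_eq_self_iff h1).mp he)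
      simp [h, hne]
  have hA : ((tri limit).foldl updA PySem.Dict.empty).items
      = ((tri limit).filter (fun t => keyOf t == t)).map
          (fun k => (k, ((tri limit).foldl updA PySem.Dict.empty).getD k 0)) := by
    rw [PySem.Dict.items_eq_map_keys _ (nodup_keys_A (tri limit)) 0, keys_A,
      ofList_map_key _ (pairwise_tri limit) (fun t ht => key_spec limit t ht)]
  rw [hA, List.map_map, hfix]
  refine List.map_congr_left ?_
  intro k hk
  have hkf := List.mem_filter.mp hk
  have h1 := ((mem_tri _ _).mp hkf.1).1
  have hfixk : gcd3 k = 1 := (keyOf_eq_self_iff h1).mp (by simpa using hkf.2)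
  simp only [Function.comp]
  rw [getD_group, PySem.Dict.getD_empty, zero_add, sum_filter_key limit k hkf.1 hfixk]
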